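-- pv_equiv track=rewrite | github.com/leotamminen/tira24k | viikko3/lastnumber.py | find
-- ===== SOURCE A (Python) =====
-- import heapq
--
-- def find(t):
--     # Luodaan minikeko
--     heapq.heapify(t)
--
--     while len(t) > 1:
--         # Poistetaan kaksi pienintä lukua ja lasketaan niiden summa
--         pienin1 = heapq.heappop(t)
--         pienin2 = heapq.heappop(t)
--         # uusi luku on tästä vähennetty 1
--         uusi_luku = pienin1 + pienin2 - 1
--
--         # Lisätään uusi luku minikekoon
--         heapq.heappush(t, uusi_luku)
--
--     # Palautetaan viimeinen luku
--     return t[0]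
-- ===== SOURCE B (Python) =====
-- def find(t):
--     # Each merge replaces two numbers by their sum minus 1, so the total sum
--     # drops by exactly 1 per merge and len(t)-1 merges happen, regardless of
--     # order: one accumulating pass gives the answer (indexing the first
--     # element raises IndexError on an empty list, just as A's final indexing does).
--     total = t[0]
--     for x in t[1:]:
--         total += x - 1
--     return total
-- ===== Notes on version B (the rewrite author's own statement) =====
-- stated objective: faster
-- what changed: Replaces the heap simulation (heapify + repeated pop/pop/push) by a single accumulating pass computing sum(t) - (len(t)-1), justified by the invariant that every merge lowers the total sum by exactly 1.
import Mathlib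
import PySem

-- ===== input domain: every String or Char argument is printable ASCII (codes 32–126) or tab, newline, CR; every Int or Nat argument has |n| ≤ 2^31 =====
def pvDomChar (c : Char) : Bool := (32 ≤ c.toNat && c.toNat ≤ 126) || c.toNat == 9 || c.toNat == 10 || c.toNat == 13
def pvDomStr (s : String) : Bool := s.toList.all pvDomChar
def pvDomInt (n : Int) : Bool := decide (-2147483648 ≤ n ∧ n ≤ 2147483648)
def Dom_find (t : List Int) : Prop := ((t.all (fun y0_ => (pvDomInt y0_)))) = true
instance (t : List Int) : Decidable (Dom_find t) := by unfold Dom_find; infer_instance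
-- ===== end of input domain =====

-- B replaces A's heap simulation by one accumulating pass computing sum(t) - (len(t)-1) (faster).
-- A mutates its argument in place (heapify/pop/push); the equivalence proved is about the return value only.
-- Each Python `while` is ported with a Nat fuel argument as a pure totality guard: every fuel-0 base
-- case returns the loop's exit value and the fuel supplied at each call site is at least the number of
-- iterations the Python loop performs, so the ports compute exactly what Python computes.

-- ===== PORT A =====
-- Port of CPython heapq._siftdown: hole-moving loop placing `newitem`.
-- (Python first writes heap[pos] = newitem before calling _siftdown; that write is
-- redundant since _siftdown only reads ancestors of pos and finally writes heap[pos],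
-- so it is folded into this function's final `set`.)
-- Fuel: called with fuel = pos; pos strictly decreases each iteration, so fuel never runs out
-- before the loop exits (and the base case is the exit value anyway).
def pySiftdownF : Nat → Nat → List Int → Nat → Int → List Int
  | 0, _, heap, pos, newitem => heap.set pos newitem
  | fuel + 1, startpos, heap, pos, newitem =>
    if startpos < pos then
      let parent := (pos - 1) / 2
      if newitem < heap.getD parent 0 then
        pySiftdownF fuel startpos (heap.set pos (heap.getD parent 0)) parent newitem
      else heap.set pos newitem
    else heap.set pos newitem

def pySiftdown (startpos : Nat) (heap : List Int) (pos : Nat) (newitem : Int) : List Int :=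
  pySiftdownF pos startpos heap pos newitem

-- Port of the loop inside CPython heapq._siftup (bubble the hole down to a leaf).
-- Fuel: childpos grows by at least 1 per iteration and the loop exits once childpos ≥ endpos,
-- so fuel = endpos (supplied by pySiftup) is at least the iteration count.
def pySiftupLoopF : Nat → Nat → List Int → Nat → Nat → List Int × Nat
  | 0, _, heap, pos, _ => (heap, pos)
  | fuel + 1, endpos, heap, pos, childpos =>
    if childpos < endpos then
      let rightpos := childpos + 1
      let childpos' := if rightpos < endpos ∧ ¬ (heap.getD childpos 0 < heap.getD rightpos 0)
                       then rightpos else childpos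
      pySiftupLoopF fuel endpos (heap.set pos (heap.getD childpos' 0)) childpos' (2 * childpos' + 1)
    else (heap, pos)

-- Port of CPython heapq._siftup. (All indices touched are in range in every call
-- heapq makes, so List.getD _ 0 reads exactly what Python reads.)
def pySiftup (heap : List Int) (pos : Nat) : List Int :=
  let endpos := heap.length
  let startpos := pos
  let newitem := heap.getD pos 0
  let heap' := (pySiftupLoopF endpos endpos heap pos (2 * pos + 1)).1
  let pos' := (pySiftupLoopF endpos endpos heap pos (2 * pos + 1)).2
  pySiftdown startpos heap' pos' newitem

-- Port of heapq.heappush.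
def pyHeappush (heap : List Int) (item : Int) : List Int :=
  let heap' := heap ++ [item]
  pySiftdown 0 heap' (heap'.length - 1) item

-- Port of heapq.heappop (heap assumed nonempty, as in every call A makes).
def pyHeappop (heap : List Int) : Int × List Int :=
  let lastelt := (heap.getLast?).getD 0      -- heap.pop()
  let heap' := heap.dropLast
  if heap' ≠ [] then
    let returnitem := heap'.getD 0 0
    (returnitem, pySiftup (heap'.set 0 lastelt) 0)
  else (lastelt, heap')

-- Port of heapq.heapify: _siftup on i = n//2 - 1 … 0.
def pyHeapify (heap : List Int) : List Int :=
  (List.range (heap.length / 2)).reverse.foldl (fun h i => pySiftup h i) heap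

-- A's while-loop. Fuel: each iteration shrinks the heap by exactly one element (two pops, one
-- push) and the loop exits at length ≤ 1, so fuel = initial length is at least the iteration count.
def findLoopF : Nat → List Int → List Int
  | 0, heap => heap
  | fuel + 1, heap =>
    if heap.length > 1 then
      let p1 := (pyHeappop heap).1
      let h1 := (pyHeappop heap).2
      let p2 := (pyHeappop h1).1
      let h2 := (pyHeappop h1).2
      findLoopF fuel (pyHeappush h2 (p1 + p2 - 1))
    else heap

def find (t : List Int) : Int :=
  ((findLoopF (pyHeapify t).length (pyHeapify t)).getD 0 0)   -- A's final first-element read; in range under Pre_find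

-- ===== PORT B =====
-- total = first element (in range under Pre_find); then one pass over the rest adding x - 1.
def find_alt (t : List Int) : Int :=
  (t.drop 1).foldl (fun total x => total + x - 1) (t.getD 0 0)

-- ===== PRECONDITION & SPEC =====
-- Pre_ excludes only the empty list, on which both A's final and B's initial first-element read raise IndexError.
def Pre_find (t : List Int) : Prop := t ≠ []
instance (t : List Int) : Decidable (Pre_find t) := by unfold Pre_find; infer_instance
def pvWitness_find : List Int := [3, 1, 2]

def Spec_find (t : List Int) (out : Int) : Prop := out = find_alt t
instance (t : List Int) (out : Int) : Decidable (Spec_find t out) := by unfold Spec_find; infer_instance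

-- ===== CLAIM (what is proved, stated in full; the proofs are below) =====
def Claim_equal_find : Prop := ∀ (t : List Int), Dom_find t → Pre_find t → Spec_find t (find t)

-- ===== LEMMAS AND PROOFS =====

theorem getD_set_ne (l : List Int) (i j : Nat) (x : Int) (hij : i ≠ j) :
    (l.set i x).getD j 0 = l.getD j 0 := by
  simp [List.getD, List.getElem?_set_ne hij]

theorem sum_set (l : List Int) (i : Nat) (x : Int) (h : i < l.length) :
    (l.set i x).sum = l.sum - l.getD i 0 + x := by
  induction l generalizing i with
  | nil => simp at h
  | cons a tl ih =>
    cases i with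
    | zero => simp [List.getD]; ring
    | succ n =>
      simp only [List.set_cons_succ, List.sum_cons]
      rw [ih n (by simpa using h)]
      have hg : (a :: tl).getD (n + 1) 0 = tl.getD n 0 := by simp [List.getD]
      rw [hg]
      ring

theorem getD_set_self (l : List Int) (i : Nat) (x : Int) (h : i < l.length) :
    (l.set i x).getD i 0 = x := by
  simp [List.getD, h]

theorem pySiftdownF_length (f : Nat) : ∀ (s : Nat) (h : List Int) (p : Nat) (x : Int),
    (pySiftdownF f s h p x).length = h.length := by
  induction f with
  | zero => intro s h p x; simp [pySiftdownF]
  | succ f ih =>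
    intro s h p x
    unfold pySiftdownF
    by_cases hsp : s < p
    · rw [if_pos hsp]
      by_cases hlt : x < h.getD ((p - 1) / 2) 0
      · rw [if_pos hlt, ih]; simp
      · rw [if_neg hlt]; simp
    · rw [if_neg hsp]; simp

theorem pySiftdownF_sum (f : Nat) : ∀ (s : Nat) (h : List Int) (p : Nat) (x : Int),
    p < h.length → (pySiftdownF f s h p x).sum = h.sum - h.getD p 0 + x := by
  induction f with
  | zero =>
    intro s h p x hp
    simp [pySiftdownF, sum_set _ _ _ hp]
  | succ f ih =>
    intro s h p x hp
    unfold pySiftdownF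
    by_cases hsp : s < p
    · rw [if_pos hsp]
      by_cases hlt : x < h.getD ((p - 1) / 2) 0
      · rw [if_pos hlt]
        rw [ih s _ ((p - 1) / 2) x (by simp; omega)]
        rw [sum_set h p _ hp, getD_set_ne h p ((p - 1) / 2) _ (by omega)]
        ring
      · rw [if_neg hlt, sum_set _ _ _ hp]
    · rw [if_neg hsp, sum_set _ _ _ hp]

theorem pySiftdown_length (s : Nat) (h : List Int) (p : Nat) (x : Int) :
    (pySiftdown s h p x).length = h.length := pySiftdownF_length p s h p x

theorem pySiftdown_sum (s : Nat) (h : List Int) (p : Nat) (x : Int) (hp : p < h.length) :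
    (pySiftdown s h p x).sum = h.sum - h.getD p 0 + x := pySiftdownF_sum p s h p x hp

theorem pySiftupLoopF_inv (f : Nat) : ∀ (e : Nat) (h : List Int) (p c : Nat),
    p < h.length → e ≤ h.length →
    (pySiftupLoopF f e h p c).1.length = h.length ∧
    (pySiftupLoopF f e h p c).2 < h.length ∧
    (pySiftupLoopF f e h p c).1.sum - (pySiftupLoopF f e h p c).1.getD (pySiftupLoopF f e h p c).2 0
      = h.sum - h.getD p 0 := by
  induction f with
  | zero =>
    intro e h p c hp _
    exact ⟨rfl, hp, rfl⟩
  | succ f ih =>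
    intro e h p c hp he
    unfold pySiftupLoopF
    by_cases hce : c < e
    · rw [if_pos hce]
      have key : ∀ cp : Nat, cp < e →
          (pySiftupLoopF f e (h.set p (h.getD cp 0)) cp (2 * cp + 1)).1.length = h.length ∧
          (pySiftupLoopF f e (h.set p (h.getD cp 0)) cp (2 * cp + 1)).2 < h.length ∧
          (pySiftupLoopF f e (h.set p (h.getD cp 0)) cp (2 * cp + 1)).1.sum -
            (pySiftupLoopF f e (h.set p (h.getD cp 0)) cp (2 * cp + 1)).1.getD
              (pySiftupLoopF f e (h.set p (h.getD cp 0)) cp (2 * cp + 1)).2 0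
            = h.sum - h.getD p 0 := by
        intro cp hcpe
        have hcp : cp < h.length := by omega
        obtain ⟨l1, l2, l3⟩ := ih e (h.set p (h.getD cp 0)) cp (2 * cp + 1)
          (by simpa using hcp) (by simpa using he)
        refine ⟨by simpa using l1, by simpa using l2, ?_⟩
        have hgd : (h.set p (h.getD cp 0)).getD cp 0 = h.getD cp 0 := by
          by_cases hpc : p = cp
          · subst hpc; exact getD_set_self h p _ hp
          · exact getD_set_ne h p cp _ hpc
        rw [l3, sum_set h p (h.getD cp 0) hp, hgd]
        ring
      by_cases hcond : c + 1 < e ∧ ¬h.getD c 0 < h.getD (c + 1) 0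
      · simp only [if_pos hcond]
        exact key (c + 1) hcond.1
      · simp only [if_neg hcond]
        exact key c hce
    · rw [if_neg hce]
      exact ⟨rfl, hp, rfl⟩

theorem pySiftup_sum_length (h : List Int) (p : Nat) (hp : p < h.length) :
    (pySiftup h p).length = h.length ∧ (pySiftup h p).sum = h.sum := by
  obtain ⟨l1, l2, l3⟩ := pySiftupLoopF_inv h.length h.length h p (2 * p + 1) hp le_rfl
  unfold pySiftup
  refine ⟨by simp [pySiftdown_length, l1], ?_⟩
  rw [pySiftdown_sum _ _ _ _ (by omega)]
  omega

theorem getD_append_last (h : List Int) (x : Int) :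
    (h ++ [x]).getD h.length 0 = x := by
  simp [List.getD]

theorem pyHeappush_sum_length (h : List Int) (x : Int) :
    (pyHeappush h x).length = h.length + 1 ∧ (pyHeappush h x).sum = h.sum + x := by
  constructor
  · unfold pyHeappush; simp [pySiftdown_length]
  · unfold pyHeappush
    simp only [List.length_append, List.length_cons, List.length_nil, Nat.add_sub_cancel]
    rw [pySiftdown_sum _ _ _ _ (by simp), getD_append_last]
    simp

theorem sum_dropLast (h : List Int) (hne : h ≠ []) :
    h.dropLast.sum + h.getLast?.getD 0 = h.sum := by
  conv_rhs => rw [← List.dropLast_append_getLast hne]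
  rw [List.getLast?_eq_some_getLast hne]
  simp

theorem pyHeappop_sum_length (h : List Int) (hne : h ≠ []) :
    (pyHeappop h).2.length = h.length - 1 ∧
    (pyHeappop h).1 + (pyHeappop h).2.sum = h.sum := by
  unfold pyHeappop
  by_cases hd : h.dropLast = []
  · have hl : h.dropLast.length = 0 := by rw [hd]; rfl
    rw [List.length_dropLast] at hl
    have hne0 : h.length ≠ 0 := fun hc => hne (List.length_eq_zero_iff.mp hc)
    obtain ⟨a, ha⟩ := List.length_eq_one_iff.mp (show h.length = 1 by omega)
    subst ha
    simp
  · have hlen0 : 0 < h.dropLast.length := by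
      cases hdl : h.dropLast with
      | nil => exact absurd hdl hd
      | cons a tl => simp
    simp only [ne_eq, hd, not_false_eq_true, if_pos]
    obtain ⟨hlen, hsum⟩ := pySiftup_sum_length (h.dropLast.set 0 (h.getLast?.getD 0)) 0
      (by simpa using hlen0)
    constructor
    · simp only [hlen, List.length_set, List.length_dropLast]
    · simp only [hsum]
      rw [sum_set _ _ _ hlen0]
      have hlast := sum_dropLast h hne
      omega

theorem pyHeapify_fold_inv (is : List Nat) : ∀ (h : List Int),
    (∀ i ∈ is, i < h.length) →
    (is.foldl (fun hh i => pySiftup hh i) h).length = h.length ∧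
    (is.foldl (fun hh i => pySiftup hh i) h).sum = h.sum := by
  induction is with
  | nil => exact fun h _ => ⟨rfl, rfl⟩
  | cons i rest ih =>
    intro h hlt
    have hi : i < h.length := hlt i (by simp)
    obtain ⟨l1, l2⟩ := pySiftup_sum_length h i hi
    obtain ⟨r1, r2⟩ := ih (pySiftup h i) (fun j hj => by rw [l1]; exact hlt j (by simp [hj]))
    simp only [List.foldl_cons] at r1 r2 ⊢
    exact ⟨by rw [r1, l1], by rw [r2, l2]⟩

theorem pyHeapify_sum_length (h : List Int) :
    (pyHeapify h).length = h.length ∧ (pyHeapify h).sum = h.sum := by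
  unfold pyHeapify
  exact pyHeapify_fold_inv _ h (fun i hi => by
    simp only [List.mem_reverse, List.mem_range] at hi
    omega)

theorem findLoopF_spec (f : Nat) : ∀ (h : List Int), h.length ≤ f + 1 → h ≠ [] →
    (findLoopF f h).length = 1 ∧ (findLoopF f h).sum = h.sum - ((h.length : Int) - 1) := by
  induction f with
  | zero =>
    intro h hl hne
    have h1 : h.length = 1 := by
      have : h.length ≠ 0 := fun hc => hne (List.length_eq_zero_iff.mp hc)
      omega
    refine ⟨h1, by rw [h1]; simp [findLoopF]⟩
  | succ f ih =>
    intro h hl hne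
    unfold findLoopF
    by_cases hlen : h.length > 1
    · rw [if_pos hlen]
      obtain ⟨e1, s1⟩ := pyHeappop_sum_length h hne
      have hne1 : (pyHeappop h).2 ≠ [] := by
        intro he
        rw [he] at e1
        simp at e1
        omega
      obtain ⟨e2, s2⟩ := pyHeappop_sum_length _ hne1
      obtain ⟨e3, s3⟩ := pyHeappush_sum_length (pyHeappop (pyHeappop h).2).2
        ((pyHeappop h).1 + (pyHeappop (pyHeappop h).2).1 - 1)
      have hnep : pyHeappush (pyHeappop (pyHeappop h).2).2
          ((pyHeappop h).1 + (pyHeappop (pyHeappop h).2).1 - 1) ≠ [] := by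
        intro he
        have hc := congrArg List.length he
        rw [e3] at hc
        simp at hc
      obtain ⟨r1, r2⟩ := ih _ (by omega) hnep
      refine ⟨r1, ?_⟩
      rw [r2, s3, e3]
      omega
    · rw [if_neg hlen]
      have h1 : h.length = 1 := by
        have : h.length ≠ 0 := fun hc => hne (List.length_eq_zero_iff.mp hc)
        omega
      refine ⟨h1, by rw [h1]; simp⟩

theorem getD_of_length_one (l : List Int) (hl : l.length = 1) :
    l.getD 0 0 = l.sum := by
  obtain ⟨a, ha⟩ := List.length_eq_one_iff.mp hl
  subst ha
  simp [List.getD]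

theorem foldl_merge (l : List Int) : ∀ (init : Int),
    l.foldl (fun total x => total + x - 1) init = init + l.sum - (l.length : Int) := by
  induction l with
  | nil => intro init; simp
  | cons a tl ih =>
    intro init
    simp only [List.foldl_cons, List.sum_cons, List.length_cons, ih]
    push_cast
    ring

theorem find_alt_closed (t : List Int) (hne : t ≠ []) :
    find_alt t = t.sum - ((t.length : Int) - 1) := by
  cases t with
  | nil => exact absurd rfl hne
  | cons a tl =>
    unfold find_alt
    simp only [List.drop_one, List.tail_cons, foldl_merge, List.getD, List.getElem?_cons_zero,
      Option.getD_some, List.sum_cons, List.length_cons]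
    push_cast
    ring

-- ===== VERDICT (by name: the statement is the Claim_ definition above) =====
theorem find_spec : Claim_equal_find := by
  intro t _ hpre
  unfold Spec_find find
  obtain ⟨hl, hs⟩ := pyHeapify_sum_length t
  have hne : pyHeapify t ≠ [] := by
    intro he
    have hc := congrArg List.length he
    rw [hl] at hc
    exact hpre (List.length_eq_zero_iff.mp (by simpa using hc))
  obtain ⟨fl, fs⟩ := findLoopF_spec (pyHeapify t).length (pyHeapify t) (by omega) hne
  rw [getD_of_length_one _ fl, fs, hs, hl, find_alt_closed t hpre]
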